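-- pv_equiv track=rewrite | github.com/JamesZwq/nclique | python/sctTree.py | degeneracy_order
-- ===== SOURCE A (Python) =====
-- import sys, heapq
--
-- def degeneracy_order(G):
--     remaining = set(G)
--     deg = {v: len(G[v]) for v in G}
--     heap = [(deg[v], v) for v in G]
--     heapq.heapify(heap)
--     order = []
--     while remaining:
--         while True:
--             d, v = heapq.heappop(heap)
--             if v in remaining and d == deg[v]:
--                 break
--         order.append(v)
--         remaining.remove(v)
--         for nbr in G[v]:
--             if nbr in remaining:
--                 deg[nbr] -= 1
--                 heapq.heappush(heap, (deg[nbr], nbr))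
--     return order                      # v₁ … vₙ
-- ===== SOURCE B (Python) =====
-- def degeneracy_order(G):
--     remaining = set(G)
--     deg = {v: len(G[v]) for v in G}
--     order = []
--     while remaining:
--         v = min(remaining, key=lambda u: (deg[u], u))
--         order.append(v)
--         remaining.remove(v)
--         for nbr in G[v]:
--             if nbr in remaining:
--                 deg[nbr] -= 1
--     return order
-- ===== Notes on version B (the rewrite author's own statement) =====
-- stated objective: simpler
-- what changed: Replaces the lazy-deletion binary heap (heapify/heappop/heappush with stale-entry skipping) by a plain repeated minimum scan over the remaining vertices keyed by (current degree, vertex id).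
import Mathlib
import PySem

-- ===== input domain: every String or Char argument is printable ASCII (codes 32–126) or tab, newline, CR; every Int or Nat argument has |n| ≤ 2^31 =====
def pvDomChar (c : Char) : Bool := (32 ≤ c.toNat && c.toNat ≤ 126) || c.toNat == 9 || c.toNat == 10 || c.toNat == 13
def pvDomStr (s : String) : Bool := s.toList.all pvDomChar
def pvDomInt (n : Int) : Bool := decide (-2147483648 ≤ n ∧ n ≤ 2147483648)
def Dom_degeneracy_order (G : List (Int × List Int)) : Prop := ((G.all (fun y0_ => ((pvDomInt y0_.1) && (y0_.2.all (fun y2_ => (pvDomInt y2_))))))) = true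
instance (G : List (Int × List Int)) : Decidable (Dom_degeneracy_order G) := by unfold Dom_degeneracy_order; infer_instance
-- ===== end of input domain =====

-- B replaces A's lazy-deletion binary heap by a repeated minimum scan keyed by (degree, id); objective: simpler.

-- Python's lexicographic '<' on int pairs (exactly the comparison heapq / min-with-tuple-key performs)
def pltB (a b : Int × Int) : Bool := decide (a.1 < b.1) || (!decide (b.1 < a.1) && decide (a.2 < b.2))

-- ===== PORT A =====
-- heapq is ported as a min-multiset of pairs: heapify is representation-only, heappop returns (and
-- removes) the smallest pair under Python's tuple order — observably exactly heapq's behaviour.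
def heapStep (acc : Option (Int × Int)) (x : Int × Int) : Option (Int × Int) :=
  match acc with
  | none => some x
  | some m => if pltB x m then some x else some m

def heapMin? (h : List (Int × Int)) : Option (Int × Int) := h.foldl heapStep none

theorem heapMin?_mem_aux : ∀ (h : List (Int × Int)) (acc m : Int × Int),
    h.foldl heapStep (some acc) = some m → m = acc ∨ m ∈ h := by
  intro h
  induction h with
  | nil => intro acc m hm; simp [List.foldl] at hm; exact Or.inl hm.symm
  | cons x t ih =>
    intro acc m hm
    simp only [List.foldl, heapStep] at hm
    by_cases hc : pltB x acc
    · simp [hc] at hm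
      rcases ih x m hm with h1 | h1
      · exact Or.inr (by simp [h1])
      · exact Or.inr (by simp [h1])
    · simp [hc] at hm
      rcases ih acc m hm with h1 | h1
      · exact Or.inl h1
      · exact Or.inr (by simp [h1])

-- used by popValid's termination proof
theorem heapMin?_mem {h : List (Int × Int)} {m : Int × Int} (hm : heapMin? h = some m) : m ∈ h := by
  cases h with
  | nil => simp [heapMin?, List.foldl] at hm
  | cons x t =>
    have : t.foldl heapStep (some x) = some m := hm
    rcases heapMin?_mem_aux t x m this with h1 | h1
    · simp [h1]
    · simp [h1]

-- A's inner 'while True' loop: pop until a live entry (v in remaining and d == deg[v]) appears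
def popValid (deg : PySem.Dict Int Int) (rem : List Int) (h : List (Int × Int)) :
    Option ((Int × Int) × List (Int × Int)) :=
  match hm : heapMin? h with
  | none => none
  | some m =>
    if rem.contains m.2 && (m.1 == deg.getD m.2 0) then some (m, h.erase m)
    else popValid deg rem (h.erase m)
termination_by h.length
decreasing_by
  have h1 := heapMin?_mem hm
  have h2 := List.length_erase_of_mem h1
  have h3 : 0 < h.length := List.length_pos_of_mem h1
  omega

-- A's outer 'while remaining' loop
def loopA (g : PySem.Dict Int (List Int)) (deg : PySem.Dict Int Int) (heap : List (Int × Int))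
    (rem : List Int) (order : List Int) : List Int :=
  if rem = [] then order
  else
    match popValid deg rem heap with
    | none => order  -- unreachable (Python heappop on exhausted heap would raise IndexError)
    | some ((_, v), h1) =>
      if hv : v ∈ rem then
        let rem' := rem.erase v   -- remaining.remove(v); membership is guaranteed by the validity check
        let st := (g.getD v []).foldl
          (fun (st : PySem.Dict Int Int × List (Int × Int)) nbr =>
            if rem'.contains nbr then
              (st.1.insert nbr (st.1.getD nbr 0 - 1), st.2 ++ [(st.1.getD nbr 0 - 1, nbr)])
            else st) (deg, h1)
        loopA g st.1 st.2 rem' (order ++ [v])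
      else order  -- unreachable totality guard
termination_by rem.length
decreasing_by
  have h1 := List.length_erase_of_mem hv
  have h2 := List.length_pos_of_mem hv
  omega

def degeneracy_order (G : List (Int × List Int)) : List Int :=
  let g := PySem.Dict.ofList G
  let remaining := PySem.Set.ofList g.keys
  let deg := g.keys.foldl (fun d v => d.insert v ((g.getD v []).length : Int)) PySem.Dict.empty
  let heap := g.keys.map (fun v => (deg.getD v 0, v))
  loopA g deg heap remaining []

-- ===== PORT B =====
-- B's outer loop: select min of remaining by (deg[u], u), then decrement live neighbours
def loopB (g : PySem.Dict Int (List Int)) (deg : PySem.Dict Int Int)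
    (rem : List Int) (order : List Int) : List Int :=
  if rem = [] then order
  else
    match PySem.List.min2? rem (fun u => deg.getD u 0) (fun u => u) with
    | none => order  -- unreachable: rem is nonempty
    | some v =>
      if hv : v ∈ rem then
        let rem' := rem.erase v   -- remaining.remove(v)
        let deg' := (g.getD v []).foldl
          (fun d nbr => if rem'.contains nbr then d.insert nbr (d.getD nbr 0 - 1) else d) deg
        loopB g deg' rem' (order ++ [v])
      else order  -- unreachable totality guard
termination_by rem.length
decreasing_by
  have h1 := List.length_erase_of_mem hv
  have h2 := List.length_pos_of_mem hv
  omega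

def degeneracy_order_alt (G : List (Int × List Int)) : List Int :=
  let g := PySem.Dict.ofList G
  let remaining := PySem.Set.ofList g.keys
  let deg := g.keys.foldl (fun d v => d.insert v ((g.getD v []).length : Int)) PySem.Dict.empty
  loopB g deg remaining []

-- ===== PRECONDITION & SPEC =====
def Spec_degeneracy_order (G : List (Int × List Int)) (out : List Int) : Prop := out = degeneracy_order_alt G
instance (G : List (Int × List Int)) (out : List Int) : Decidable (Spec_degeneracy_order G out) := by unfold Spec_degeneracy_order; infer_instance

-- ===== CLAIM (what is proved, stated in full; the proofs are below) =====
def Claim_equal_degeneracy_order : Prop := ∀ (G : List (Int × List Int)), Dom_degeneracy_order G → Spec_degeneracy_order G (degeneracy_order G)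

-- ===== LEMMAS AND PROOFS =====

theorem pltB_trans {a b c : Int × Int} (h1 : pltB a b) (h2 : pltB b c) : pltB a c := by
  simp [pltB] at *; omega

theorem pltB_conn {a b : Int × Int} (h1 : ¬ pltB a b) (h2 : ¬ pltB b a) : a = b := by
  simp [pltB] at *
  rcases a with ⟨a1, a2⟩; rcases b with ⟨b1, b2⟩
  simp_all
  constructor <;> omega

theorem pltB_irrefl (a : Int × Int) : ¬ pltB a a := by simp [pltB]

theorem pltB_conn' {a b : Int × Int} (h1 : ¬ pltB a b) : pltB b a ∨ b = a := by
  by_cases h2 : pltB b a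
  · exact Or.inl h2
  · exact Or.inr (pltB_conn h2 h1)

-- generic spec of the running-minimum fold (shared by heapMin? and min2?)
theorem foldMin_spec {α : Type} (keyp : α → Int × Int) (step : Option α → α → Option α)
    (hstep : ∀ m x, step (some m) x = if pltB (keyp x) (keyp m) then some x else some m) :
    ∀ (t : List α) (m : α), ∃ m',
      t.foldl step (some m) = some m' ∧
      (m' = m ∨ m' ∈ t) ∧ ¬ pltB (keyp m) (keyp m') ∧ ∀ u ∈ t, ¬ pltB (keyp u) (keyp m') := by
  intro t
  induction t with
  | nil =>
    intro m
    exact ⟨m, rfl, Or.inl rfl, pltB_irrefl _, by simp⟩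
  | cons x t ih =>
    intro m
    by_cases hc : pltB (keyp x) (keyp m)
    · obtain ⟨m', hfold, hmem, hm1, hall⟩ := ih x
      refine ⟨m', ?_, ?_, ?_, ?_⟩
      · simp only [List.foldl_cons, hstep, hc, if_true, hfold]
      · rcases hmem with h | h
        · exact Or.inr (by simp [h])
        · exact Or.inr (by simp [h])
      · intro hmm'
        exact hm1 (pltB_trans hc hmm')
      · intro u hu
        rcases List.mem_cons.mp hu with h | h
        · subst h; exact hm1
        · exact hall u h
    · obtain ⟨m', hfold, hmem, hm1, hall⟩ := ih m
      refine ⟨m', ?_, ?_, hm1, ?_⟩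
      · simpa only [List.foldl_cons, hstep, hc, Bool.false_eq_true, if_false] using hfold
      · rcases hmem with h | h
        · exact Or.inl h
        · exact Or.inr (by simp [h])
      · intro u hu
        rcases List.mem_cons.mp hu with h | h
        · subst h
          intro hxm'
          rcases pltB_conn' hc with h2 | h2
          · exact hm1 (pltB_trans h2 hxm')
          · rw [show pltB (keyp u) (keyp m') = pltB (keyp m) (keyp m') by rw [h2]] at hxm'
            exact hm1 hxm'
        · exact hall u h

theorem heapMin?_spec {h : List (Int × Int)} (hne : h ≠ []) :
    ∃ m, heapMin? h = some m ∧ m ∈ h ∧ ∀ x ∈ h, ¬ pltB x m := by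
  cases h with
  | nil => exact absurd rfl hne
  | cons x t =>
    obtain ⟨m', hfold, hmem, hm1, hall⟩ := foldMin_spec (fun p => p) heapStep (fun m x => rfl) t x
    refine ⟨m', hfold, ?_, ?_⟩
    · rcases hmem with h | h
      · simp [h]
      · simp [h]
    · intro y hy
      rcases List.mem_cons.mp hy with h | h
      · subst h; exact hm1
      · exact hall y h

def minStep2 (deg : PySem.Dict Int Int) (acc : Option Int) (x : Int) : Option Int :=
  match acc with
  | none => some x
  | some m => if pltB (deg.getD x 0, x) (deg.getD m 0, m) then some x else some m

theorem min2?_eq (deg : PySem.Dict Int Int) (xs : List Int) :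
    PySem.List.min2? xs (fun u => deg.getD u 0) (fun u => u) = xs.foldl (minStep2 deg) none := by
  unfold PySem.List.min2?
  apply List.foldl_ext
  intro a b _
  cases a <;> rfl

theorem min2?_spec (deg : PySem.Dict Int Int) {rem : List Int} (hne : rem ≠ []) :
    ∃ v, PySem.List.min2? rem (fun u => deg.getD u 0) (fun u => u) = some v ∧ v ∈ rem ∧
      ∀ u ∈ rem, ¬ pltB (deg.getD u 0, u) (deg.getD v 0, v) := by
  cases rem with
  | nil => exact absurd rfl hne
  | cons x t =>
    obtain ⟨m', hfold, hmem, hm1, hall⟩ :=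
      foldMin_spec (fun u => (deg.getD u 0, u)) (minStep2 deg) (fun m x => rfl) t x
    refine ⟨m', ?_, ?_, ?_⟩
    · rw [min2?_eq]
      exact hfold
    · rcases hmem with h | h
      · simp [h]
      · simp [h]
    · intro y hy
      rcases List.mem_cons.mp hy with h | h
      · subst h; exact hm1
      · exact hall y h

theorem popValid_spec_aux (deg : PySem.Dict Int Int) (rem : List Int) :
    ∀ (n : Nat) (h : List (Int × Int)), h.length ≤ n → ∀ (v : Int), v ∈ rem →
    (∀ u ∈ rem, (deg.getD u 0, u) ∈ h) →
    ∃ w h', popValid deg rem h = some ((deg.getD w 0, w), h') ∧ w ∈ rem ∧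
      (∀ u ∈ rem, ¬ pltB (deg.getD u 0, u) (deg.getD w 0, w)) ∧
      (∀ u ∈ rem, u ≠ w → (deg.getD u 0, u) ∈ h') ∧
      (∀ p ∈ h', p ∈ h) := by
  intro n
  induction n with
  | zero =>
    intro h hlen v hv hall
    have : (deg.getD v 0, v) ∈ h := hall v hv
    have := List.length_pos_of_mem this
    omega
  | succ n ih =>
    intro h hlen v hv hall
    have hne : h ≠ [] := by
      intro he
      exact absurd (hall v hv) (by simp [he])
    obtain ⟨m, hmin, hmem, hminim⟩ := heapMin?_spec hne
    by_cases hc : rem.contains m.2 && (m.1 == deg.getD m.2 0)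
    · -- the popped minimum is live: it is returned
      have hc2 := hc
      simp only [Bool.and_eq_true, List.contains_iff_exists_mem_beq, beq_iff_eq] at hc2
      obtain ⟨⟨w0, hw0, hbw⟩, hdm⟩ := hc2
      have hm2 : m.2 ∈ rem := by rw [hbw]; exact hw0
      have hmpair : m = (deg.getD m.2 0, m.2) := by
        rcases m with ⟨m1, m2⟩
        simp at hdm ⊢
        exact hdm
      refine ⟨m.2, h.erase m, ?_, hm2, ?_, ?_, ?_⟩
      · rw [popValid, hmin]
        simp only [hc, if_true]
        rw [← hmpair]
      · intro u hu
        rw [← hmpair]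
        exact hminim _ (hall u hu)
      · intro u hu hne2
        apply (List.mem_erase_of_ne ?_).mpr (hall u hu)
        intro he
        exact hne2 (congrArg Prod.snd he)
      · intro p hp
        exact List.mem_of_mem_erase hp
    · -- stale entry: it is discarded and the loop continues
      have hlen2 : (h.erase m).length ≤ n := by
        have := List.length_erase_of_mem hmem
        have := List.length_pos_of_mem hmem
        omega
      have hall2 : ∀ u ∈ rem, (deg.getD u 0, u) ∈ h.erase m := by
        intro u hu
        apply (List.mem_erase_of_ne ?_).mpr (hall u hu)
        intro he
        apply hc
        rw [← he]
        simp
        exact hu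
      obtain ⟨w, h', hrun, hw, hmin2, hkeep, hsub⟩ := ih (h.erase m) hlen2 v hv hall2
      refine ⟨w, h', ?_, hw, hmin2, hkeep, ?_⟩
      · rw [popValid, hmin]
        simp only [hc]
        exact hrun
      · intro p hp
        exact List.mem_of_mem_erase (hsub p hp)

theorem popValid_spec (deg : PySem.Dict Int Int) (rem : List Int) (h : List (Int × Int))
    (v : Int) (hv : v ∈ rem) (hall : ∀ u ∈ rem, (deg.getD u 0, u) ∈ h) :
    ∃ w h', popValid deg rem h = some ((deg.getD w 0, w), h') ∧ w ∈ rem ∧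
      (∀ u ∈ rem, ¬ pltB (deg.getD u 0, u) (deg.getD w 0, w)) ∧
      (∀ u ∈ rem, u ≠ w → (deg.getD u 0, u) ∈ h') ∧
      (∀ p ∈ h', p ∈ h) :=
  popValid_spec_aux deg rem h.length h (le_refl _) v hv hall

-- the neighbour-update folds of A and B keep the same degrees …
theorem fold_fst (rem' : List Int) : ∀ (nbrs : List Int) (deg : PySem.Dict Int Int) (h : List (Int × Int)),
    (nbrs.foldl (fun (st : PySem.Dict Int Int × List (Int × Int)) nbr =>
        if rem'.contains nbr then
          (st.1.insert nbr (st.1.getD nbr 0 - 1), st.2 ++ [(st.1.getD nbr 0 - 1, nbr)])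
        else st) (deg, h)).1 =
    nbrs.foldl (fun d nbr => if rem'.contains nbr then d.insert nbr (d.getD nbr 0 - 1) else d) deg := by
  intro nbrs
  induction nbrs with
  | nil => intro deg h; rfl
  | cons x t ih =>
    intro deg h
    by_cases hc : rem'.contains x
    · simp only [List.foldl_cons, hc, if_true]
      exact ih _ _
    · simp only [List.foldl_cons, hc, Bool.false_eq_true, if_false]
      exact ih _ _

-- … keep every live entry of B's current degrees inside A's heap …
theorem fold_inv2 (rem' : List Int) : ∀ (nbrs : List Int) (deg : PySem.Dict Int Int) (h : List (Int × Int)),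
    (∀ u ∈ rem', (deg.getD u 0, u) ∈ h) →
    ∀ u ∈ rem',
      ((nbrs.foldl (fun d nbr => if rem'.contains nbr then d.insert nbr (d.getD nbr 0 - 1) else d) deg).getD u 0, u) ∈
      (nbrs.foldl (fun (st : PySem.Dict Int Int × List (Int × Int)) nbr =>
        if rem'.contains nbr then
          (st.1.insert nbr (st.1.getD nbr 0 - 1), st.2 ++ [(st.1.getD nbr 0 - 1, nbr)])
        else st) (deg, h)).2 := by
  intro nbrs
  induction nbrs with
  | nil => intro deg h hin u hu; exact hin u hu
  | cons x t ih =>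
    intro deg h hin u hu
    by_cases hc : rem'.contains x
    · simp only [List.foldl_cons, hc, if_true]
      refine ih _ _ ?_ u hu
      intro w hw
      by_cases hwx : w = x
      · subst hwx
        rw [PySem.Dict.getD_insert_self]
        simp
      · rw [PySem.Dict.getD_insert, if_neg hwx]
        exact List.mem_append_left _ (hin w hw)
    · simp only [List.foldl_cons, hc, Bool.false_eq_true, if_false]
      exact ih _ _ hin u hu

-- … and never push an entry below the final degree of a live vertex
theorem fold_inv3 (rem' : List Int) : ∀ (nbrs : List Int) (deg : PySem.Dict Int Int) (h : List (Int × Int)),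
    (∀ p ∈ h, p.2 ∈ rem' → deg.getD p.2 0 ≤ p.1) →
    ∀ p ∈ (nbrs.foldl (fun (st : PySem.Dict Int Int × List (Int × Int)) nbr =>
        if rem'.contains nbr then
          (st.1.insert nbr (st.1.getD nbr 0 - 1), st.2 ++ [(st.1.getD nbr 0 - 1, nbr)])
        else st) (deg, h)).2,
      p.2 ∈ rem' →
      (nbrs.foldl (fun d nbr => if rem'.contains nbr then d.insert nbr (d.getD nbr 0 - 1) else d) deg).getD p.2 0 ≤ p.1 := by
  intro nbrs
  induction nbrs with
  | nil => intro deg h hin p hp hpr; exact hin p hp hpr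
  | cons x t ih =>
    intro deg h hin p hp hpr
    by_cases hc : rem'.contains x
    · simp only [List.foldl_cons, hc, if_true] at hp ⊢
      refine ih _ _ ?_ p hp hpr
      intro q hq hqr
      rcases List.mem_append.mp hq with hq1 | hq1
      · by_cases hqx : q.2 = x
        · rw [hqx, PySem.Dict.getD_insert_self]
          have := hin q hq1 hqr
          rw [hqx] at this
          omega
        · rw [PySem.Dict.getD_insert, if_neg hqx]
          exact hin q hq1 hqr
      · have hq2 : q = (deg.getD x 0 - 1, x) := by simpa using hq1
        rw [hq2]
        simp [PySem.Dict.getD_insert_self]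
    · simp only [List.foldl_cons, hc, Bool.false_eq_true, if_false] at hp ⊢
      exact ih _ _ hin p hp hpr

-- the two outer loops agree under the heap invariant
theorem loop_eq (g : PySem.Dict Int (List Int)) :
    ∀ (n : Nat) (rem : List Int) (deg : PySem.Dict Int Int) (heap : List (Int × Int)) (order : List Int),
    rem.length ≤ n → rem.Nodup →
    (∀ u ∈ rem, (deg.getD u 0, u) ∈ heap) →
    (∀ p ∈ heap, p.2 ∈ rem → deg.getD p.2 0 ≤ p.1) →
    loopA g deg heap rem order = loopB g deg rem order := by
  intro n
  induction n with
  | zero =>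
    intro rem deg heap order hlen _ _ _
    have : rem = [] := List.length_eq_zero_iff.mp (Nat.le_zero.mp hlen)
    subst this
    rw [loopA, loopB]
    simp
  | succ n ih =>
    intro rem deg heap order hlen hnd hin2 hin3
    by_cases hre : rem = []
    · subst hre
      rw [loopA, loopB]
      simp
    · obtain ⟨v0, hv0⟩ := List.exists_mem_of_ne_nil rem hre
      obtain ⟨w, h', hrun, hw, hminA, hkeep, hsub⟩ := popValid_spec deg rem heap v0 hv0 hin2
      obtain ⟨vB, hminrun, hvB, hminB⟩ := min2?_spec deg hre
      have hwvB : w = vB := by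
        have h1 : ¬ pltB (deg.getD vB 0, vB) (deg.getD w 0, w) := hminA vB hvB
        have h2 : ¬ pltB (deg.getD w 0, w) (deg.getD vB 0, vB) := hminB w hw
        exact congrArg Prod.snd (pltB_conn h2 h1)
      subst hwvB
      rw [loopA, loopB]
      simp only [if_neg hre, hrun, hminrun, dif_pos hw]
      rw [fold_fst]
      apply ih
      · have := List.length_erase_of_mem hw
        omega
      · exact hnd.erase _
      · apply fold_inv2
        intro u hu
        have hmem := (List.Nodup.mem_erase_iff hnd).mp hu
        exact hkeep u hmem.2 hmem.1
      · apply fold_inv3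
        intro p hp hpr
        exact hin3 p (hsub p hp) (List.mem_of_mem_erase hpr)

-- ===== VERDICT (by name: the statement is the Claim_ definition above) =====
theorem degeneracy_order_spec : Claim_equal_degeneracy_order := by
  intro G _
  simp only [Spec_degeneracy_order, degeneracy_order, degeneracy_order_alt]
  refine loop_eq _ _ _ _ _ _ (le_refl _) ?_ ?_ ?_
  · exact PySem.Set.nodup_ofList _
  · intro u hu
    have : u ∈ (PySem.Dict.ofList G).keys := (PySem.Set.mem_ofList _ _).mp hu
    exact List.mem_map.mpr ⟨u, this, rfl⟩
  · intro p hp _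
    obtain ⟨v, _, hv⟩ := List.mem_map.mp hp
    rw [← hv]
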